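-- pv_equiv track=rewrite | github.com/alfredronning/adventofcode | 2015/day15/solver2.py | find_best_combo
-- ===== SOURCE A (Python) =====
-- PROPERTIES_COUNT = 5
--
-- def add_ingredient(current_properties, properties, count):
--     return [current_properties[i]*count+properties[i] for i in range(PROPERTIES_COUNT)]
--
-- def calc_res(properties):
--     if properties[-1] != 500:
--         return 0
--     res = 1
--     for p in properties[:-1]:
--         res *= max(p, 0)
--     return res
--
-- def find_best_combo(ingredient_dict, current_ingredient, remainding, properties, visited):
--     next_ingredients = [i for i in ingredient_dict.keys() if i not in visited]
--     current_properties = ingredient_dict[current_ingredient]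
--     if not remainding:
--         return calc_res(properties)
--     if not len(next_ingredients):
--         properties = add_ingredient(current_properties, properties, remainding)
--         return calc_res(properties)
--
--     next_ingredient = next_ingredients[0]
--     visited = visited+[next_ingredient]
--     res = 0
--     for usage in range(remainding+1):
--         next_properties = add_ingredient(current_properties, properties, usage)
--         current_res = find_best_combo(ingredient_dict, next_ingredient, remainding-usage, next_properties, visited)
--         res = max(res, current_res)
--     return res
-- ===== SOURCE B (Python) =====
-- PROPERTIES_COUNT = 5
--
-- def _score(vec):
--     res = 1
--     for p in vec[:-1]:
--         res *= max(p, 0)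
--     return res if vec[-1] == 500 else 0
--
-- def _compositions(n, k):
--     # all length-k integer vectors with non-negative parts except possibly the
--     # forced last one, summing to n, in lexicographic order of the prefixes
--     if k == 1:
--         return [[n]]
--     out = []
--     for head in range(n + 1):
--         for tail in _compositions(n - head, k - 1):
--             out.append([head] + tail)
--     return out
--
-- def find_best_combo(ingredient_dict, current_ingredient, remainding, properties, visited):
--     if remainding == 0:
--         return _score(properties)
--     ingredients = [current_ingredient] + [k for k in ingredient_dict if k not in visited]
--     vectors = [ingredient_dict[k] for k in ingredients]
--     best = 0
--     for combo in _compositions(remainding, len(ingredients)):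
--         mixed = [sum(v[j] * c for v, c in zip(vectors, combo)) + properties[j]
--                  for j in range(PROPERTIES_COUNT)]
--         best = max(best, _score(mixed))
--     return best
-- ===== Notes on version B (the rewrite author's own statement) =====
-- stated objective: alternative
-- what changed: A interleaves search and scoring in a recursive DFS over teaspoon counts; B first materialises the explicit list of ingredients to place and the full list of compositions of `remainding` over them, then takes the max score over those composition vectors in one non-recursive pass.
import Mathlib
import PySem

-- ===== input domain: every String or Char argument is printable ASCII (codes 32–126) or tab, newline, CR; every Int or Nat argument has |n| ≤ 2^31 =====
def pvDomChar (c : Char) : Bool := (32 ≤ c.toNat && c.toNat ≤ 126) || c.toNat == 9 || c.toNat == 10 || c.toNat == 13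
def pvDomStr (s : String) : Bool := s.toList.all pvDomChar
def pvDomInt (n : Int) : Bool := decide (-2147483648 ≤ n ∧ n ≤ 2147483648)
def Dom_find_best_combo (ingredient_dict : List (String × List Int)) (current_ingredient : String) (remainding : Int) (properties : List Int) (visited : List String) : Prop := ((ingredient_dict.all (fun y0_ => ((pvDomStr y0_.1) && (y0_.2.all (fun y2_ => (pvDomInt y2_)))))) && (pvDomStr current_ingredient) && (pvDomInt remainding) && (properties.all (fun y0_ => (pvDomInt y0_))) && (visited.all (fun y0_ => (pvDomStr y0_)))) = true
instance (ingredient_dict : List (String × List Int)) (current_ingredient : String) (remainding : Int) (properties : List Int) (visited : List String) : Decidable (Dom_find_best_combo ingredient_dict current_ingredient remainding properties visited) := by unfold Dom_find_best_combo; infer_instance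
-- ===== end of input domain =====

-- B replaces A's recursive DFS by explicit composition enumeration over the ingredient list, then one max-scan (alternative decomposition, same cost).
-- ===== PORT A =====
-- termination helper for the port's recursion (cited in decreasing_by): marking one more
-- ingredient visited strictly shrinks the unvisited-key list (dict keys are distinct)
theorem pv_filter_visited_next (keys visited : List String) (next : String) (rest : List String)
    (hnd : keys.Nodup)
    (h : keys.filter (fun i => !visited.contains i) = next :: rest) :
    (keys.filter (fun i => !(visited ++ [next]).contains i)).length
      < (keys.filter (fun i => !visited.contains i)).length := by
  have hnodup : (keys.filter (fun i => !visited.contains i)).Nodup := hnd.filter _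
  have h2 : keys.filter (fun i => !(visited ++ [next]).contains i)
      = (keys.filter (fun i => !visited.contains i)).filter (fun i => !(i == next)) := by
    rw [List.filter_filter]
    apply List.filter_congr
    intro x _
    cases h1 : visited.contains x <;> cases h2 : x == next <;>
      simp_all [Bool.and_comm]
  rw [h2, h]
  rw [h] at hnodup
  have hne : rest.filter (fun i => !(i == next)) = rest := by
    apply List.filter_eq_self.2
    intro a ha
    simp only [Bool.not_eq_eq_eq_not, Bool.not_true, beq_eq_false_iff_ne, ne_eq]
    rintro rfl
    exact (List.nodup_cons.1 hnodup).1 ha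
  simp [hne]

def pvAddIngredient (current_properties properties : List Int) (count : Int) : List Int :=
  (PySem.List.pyRange 0 5 1).map (fun i =>
    PySem.List.pyGetD current_properties i 0 * count + PySem.List.pyGetD properties i 0)

def pvCalcRes (properties : List Int) : Int :=
  if PySem.List.pyGetD properties (-1) 0 ≠ 500 then 0
  else (PySem.List.slice properties none (some (-1))).foldl (fun res p => res * max p 0) 1

def find_best_combo (ingredient_dict : List (String × List Int)) (current_ingredient : String) (remainding : Int) (properties : List Int) (visited : List String) : Int :=
  let d := PySem.Dict.ofList ingredient_dict
  let next_ingredients := d.keys.filter (fun i => !visited.contains i)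
  let current_properties := d.getD current_ingredient []   -- ingredient_dict[current_ingredient]; Pre_ guarantees the key exists
  if remainding = 0 then pvCalcRes properties
  else match h : next_ingredients with
    | [] => pvCalcRes (pvAddIngredient current_properties properties remainding)
    | next_ingredient :: _ =>
      (PySem.List.pyRange 0 (remainding + 1) 1).foldl
        (fun res usage =>
          max res (find_best_combo ingredient_dict next_ingredient (remainding - usage)
                    (pvAddIngredient current_properties properties usage)
                    (visited ++ [next_ingredient]))) 0
termination_by ((PySem.Dict.ofList ingredient_dict).keys.filter (fun i => !visited.contains i)).length
decreasing_by
  exact pv_filter_visited_next _ _ _ _ (PySem.Dict.nodup_keys_ofList ingredient_dict) h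

-- ===== PORT B =====
def pvScore (vec : List Int) : Int :=
  let res := (PySem.List.slice vec none (some (-1))).foldl (fun res p => res * max p 0) 1
  if PySem.List.pyGetD vec (-1) 0 == 500 then res else 0

def pvCompositions (n : Int) : Nat → List (List Int)
  | 0 => []
  | 1 => [[n]]
  | (k+2) => (PySem.List.pyRange 0 (n + 1) 1).flatMap (fun head =>
      (pvCompositions (n - head) (k+1)).map (fun tail => head :: tail))

def pvMix (vectors : List (List Int)) (combo : List Int) (properties : List Int) : List Int :=
  (PySem.List.pyRange 0 5 1).map (fun j =>
    ((vectors.zip combo).map (fun vc => PySem.List.pyGetD vc.1 j 0 * vc.2)).sum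
      + PySem.List.pyGetD properties j 0)

def find_best_combo_alt (ingredient_dict : List (String × List Int)) (current_ingredient : String) (remainding : Int) (properties : List Int) (visited : List String) : Int :=
  if remainding = 0 then pvScore properties
  else
    let d := PySem.Dict.ofList ingredient_dict
    let ingredients := current_ingredient :: d.keys.filter (fun i => !visited.contains i)
    let vectors := ingredients.map (fun k => d.getD k [])
    (pvCompositions remainding ingredients.length).foldl
      (fun best combo => max best (pvScore (pvMix vectors combo properties))) 0

-- ===== PRECONDITION & SPEC =====
-- Pre_ excludes exactly the inputs where the Python A raises: a current_ingredient absent from the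
-- dict (KeyError), properties empty when remainding == 0 (IndexError in calc_res), and, whenever an
-- add_ingredient call is actually reached (remainding ≠ 0, unless remainding < 0 with unvisited
-- ingredients left, where the loop body never runs), a reached property vector of length < 5 (IndexError).
def Pre_find_best_combo (ingredient_dict : List (String × List Int)) (current_ingredient : String) (remainding : Int) (properties : List Int) (visited : List String) : Prop :=
  ingredient_dict.any (fun p => p.1 == current_ingredient) = true ∧
  (if remainding = 0 then properties ≠ []
   else if remainding < 0 ∧ ingredient_dict.any (fun p => !visited.contains p.1) = true then True
   else 5 ≤ properties.length ∧
     ∀ p ∈ ingredient_dict, (visited.contains p.1 = true ∧ p.1 ≠ current_ingredient) ∨ 5 ≤ p.2.length)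
instance (ingredient_dict : List (String × List Int)) (current_ingredient : String) (remainding : Int) (properties : List Int) (visited : List String) : Decidable (Pre_find_best_combo ingredient_dict current_ingredient remainding properties visited) := by unfold Pre_find_best_combo; infer_instance

def pvWitness_find_best_combo : (List (String × List Int)) × String × Int × List Int × List String :=
  ([("a", [1, 2, 3, 4, 100]), ("b", [2, 1, 0, 1, 100])], "a", 5, [0, 0, 0, 0, 0], [])

def Spec_find_best_combo (ingredient_dict : List (String × List Int)) (current_ingredient : String) (remainding : Int) (properties : List Int) (visited : List String) (out : Int) : Prop := out = find_best_combo_alt ingredient_dict current_ingredient remainding properties visited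
instance (ingredient_dict : List (String × List Int)) (current_ingredient : String) (remainding : Int) (properties : List Int) (visited : List String) (out : Int) : Decidable (Spec_find_best_combo ingredient_dict current_ingredient remainding properties visited out) := by unfold Spec_find_best_combo; infer_instance

-- ===== CLAIM (what is proved, stated in full; the proofs are below) =====
def Claim_equal_find_best_combo : Prop := ∀ (ingredient_dict : List (String × List Int)) (current_ingredient : String) (remainding : Int) (properties : List Int) (visited : List String), Dom_find_best_combo ingredient_dict current_ingredient remainding properties visited → Pre_find_best_combo ingredient_dict current_ingredient remainding properties visited → Spec_find_best_combo ingredient_dict current_ingredient remainding properties visited (find_best_combo ingredient_dict current_ingredient remainding properties visited)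

-- ===== LEMMAS AND PROOFS =====
theorem pv_calc_eq (v : List Int) : pvCalcRes v = pvScore v := by
  by_cases h : PySem.List.pyGetD v (-1) 0 = 500 <;> simp [pvCalcRes, pvScore, h]

theorem pv_foldl_prod_nonneg (l : List Int) : ∀ a : Int, 0 ≤ a →
    0 ≤ l.foldl (fun res p => res * max p 0) a := by
  induction l with
  | nil => intro a ha; exact ha
  | cons x t ih =>
    intro a ha
    exact ih _ (mul_nonneg ha (le_max_right x 0))

theorem pv_score_nonneg (v : List Int) : 0 ≤ pvScore v := by
  unfold pvScore
  split
  · exact pv_foldl_prod_nonneg _ 1 (by omega)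
  · exact le_refl 0

theorem pv_foldl_flatMap {α β γ : Type} (l : List α) (g : α → List β) (f : γ → β → γ) :
    ∀ a : γ, (l.flatMap g).foldl f a = l.foldl (fun a x => (g x).foldl f a) a := by
  induction l with
  | nil => intro a; rfl
  | cons x t ih => intro a; simp only [List.flatMap_cons, List.foldl_append, List.foldl_cons, ih]

theorem pv_foldl_max_shift {α : Type} (g : α → Int) (l : List α) :
    ∀ b : Int, (∀ c ∈ l, 0 ≤ g c) → 0 ≤ b →
      l.foldl (fun x c => max x (g c)) b = max b (l.foldl (fun x c => max x (g c)) 0) := by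
  induction l with
  | nil => intro b _ hb; simp [max_eq_left hb]
  | cons c t ih =>
    intro b hg hb
    have hgc : 0 ≤ g c := hg c (by simp)
    have ht : ∀ x ∈ t, 0 ≤ g x := fun x hx => hg x (by simp [hx])
    simp only [List.foldl_cons]
    rw [ih (max b (g c)) ht (le_trans hb (le_max_left _ _)),
        ih (max 0 (g c)) ht (le_max_left _ _), max_eq_right hgc, max_assoc]

theorem pv_foldl_congr_inv {α : Type} (l : List α) :
    ∀ (f g : Int → α → Int) (P : Int → Prop),
      (∀ b x, x ∈ l → P b → P (f b x)) →
      (∀ b x, x ∈ l → P b → f b x = g b x) →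
      ∀ b, P b → l.foldl f b = l.foldl g b := by
  induction l with
  | nil => intro f g P _ _ b _; rfl
  | cons x t ih =>
    intro f g P hpres hfg b hb
    simp only [List.foldl_cons]
    rw [← hfg b x (by simp) hb]
    exact ih f g P (fun b y hy hb => hpres b y (by simp [hy]) hb)
      (fun b y hy hb => hfg b y (by simp [hy]) hb) (f b x) (hpres b x (by simp) hb)

theorem pv_comps_zero : ∀ k : Nat, pvCompositions 0 (k + 1) = [List.replicate (k + 1) 0] := by
  intro k
  induction k with
  | zero => rfl
  | succ k ih =>
    show pvCompositions 0 (k + 2) = _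
    unfold pvCompositions
    rw [show (0 : Int) + 1 = 0 + 1 by rfl, PySem.List.pyRange_one_singleton 0]
    simp [ih, List.replicate_succ]

theorem pv_add_length (cp props : List Int) (u : Int) : (pvAddIngredient cp props u).length = 5 := by
  simp [pvAddIngredient, PySem.List.length_pyRange_one]

theorem pv_mix_single (cp props : List Int) (u : Int) :
    pvMix [cp] [u] props = pvAddIngredient cp props u := by
  simp [pvMix, pvAddIngredient]

theorem pv_mix_cons (cp : List Int) (vs : List (List Int)) (u : Int) (t props : List Int) :
    pvMix (cp :: vs) (u :: t) props = pvMix vs t (pvAddIngredient cp props u) := by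
  unfold pvMix
  apply List.map_congr_left
  intro j hj
  obtain ⟨hj0, hj5⟩ := (PySem.List.mem_pyRange_one).1 hj
  simp only [pvAddIngredient]
  rw [PySem.List.pyGetD_map_pyRange_of_nonneg _ _ _ _ hj0 hj5]
  simp only [List.zip_cons_cons, List.map_cons, List.sum_cons]
  ring

theorem pv_mix_zeros (vs : List (List Int)) (m : Nat) (props : List Int) (h : props.length = 5) :
    pvMix vs (List.replicate m 0) props = props := by
  unfold pvMix
  have hz : ∀ j : Int, ((vs.zip (List.replicate m (0:Int))).map
      (fun vc => PySem.List.pyGetD vc.1 j 0 * vc.2)).sum = 0 := by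
    intro j
    apply List.sum_eq_zero
    intro x hx
    obtain ⟨vc, hvc, rfl⟩ := List.mem_map.1 hx
    have h2 := (List.of_mem_zip hvc).2
    rw [List.eq_of_mem_replicate h2, mul_zero]
  simp only [hz, zero_add]
  have h5 : (5 : Int) = PySem.List.len props := by simp [PySem.List.len_eq, h]
  rw [h5, PySem.List.map_pyGetD_pyRange_zero]

theorem pv_unvis_step (keys visited : List String) (next : String) (rest : List String)
    (hnd : keys.Nodup)
    (h : keys.filter (fun i => !visited.contains i) = next :: rest) :
    keys.filter (fun i => !(visited ++ [next]).contains i) = rest := by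
  have hnodup : (keys.filter (fun i => !visited.contains i)).Nodup := hnd.filter _
  have h2 : keys.filter (fun i => !(visited ++ [next]).contains i)
      = (keys.filter (fun i => !visited.contains i)).filter (fun i => !(i == next)) := by
    rw [List.filter_filter]
    apply List.filter_congr
    intro x _
    cases h1 : visited.contains x <;> cases h2 : x == next <;>
      simp_all [Bool.and_comm]
  rw [h2, h]
  rw [h] at hnodup
  have hne : rest.filter (fun i => !(i == next)) = rest := by
    apply List.filter_eq_self.2
    intro a ha
    simp only [Bool.not_eq_eq_eq_not, Bool.not_true, beq_eq_false_iff_ne, ne_eq]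
    rintro rfl
    exact (List.nodup_cons.1 hnodup).1 ha
  simp [hne]

-- A's DFS equals B's max over all compositions of `remainding` across cur :: unvisited keys
theorem pv_main (dct : List (String × List Int)) : ∀ (n : Nat) (cur : String) (r : Int)
    (props : List Int) (visited : List String),
    ((PySem.Dict.ofList dct).keys.filter (fun i => !visited.contains i)).length = n →
    r ≠ 0 → 5 ≤ props.length →
    5 ≤ ((PySem.Dict.ofList dct).getD cur []).length →
    (∀ k ∈ (PySem.Dict.ofList dct).keys.filter (fun i => !visited.contains i),
      5 ≤ ((PySem.Dict.ofList dct).getD k []).length) →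
    find_best_combo dct cur r props visited =
      (pvCompositions r ((cur :: (PySem.Dict.ofList dct).keys.filter (fun i => !visited.contains i)).length)).foldl
        (fun best combo => max best (pvScore (pvMix
          ((cur :: (PySem.Dict.ofList dct).keys.filter (fun i => !visited.contains i)).map
            (fun k => (PySem.Dict.ofList dct).getD k []))
          combo props))) 0 := by
  intro n
  induction n using Nat.strong_induction_on with
  | _ n ih =>
  intro cur r props visited hlen hr hp hc hu
  cases h : (PySem.Dict.ofList dct).keys.filter (fun i => !visited.contains i) with
  | nil =>
    rw [find_best_combo.eq_def]
    simp only [if_neg hr]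
    split
    · show pvCalcRes _ = (pvCompositions r 1).foldl _ 0
      simp only [pvCompositions, List.foldl_cons, List.foldl_nil, List.map_cons, List.map_nil]
      rw [pv_mix_single, pv_calc_eq, max_eq_right (pv_score_nonneg _)]
    · rename_i ni tail heq
      rw [h] at heq
      simp at heq
  | cons next rest =>
    have hnd := PySem.Dict.nodup_keys_ofList dct
    have hstep := pv_unvis_step _ visited next rest hnd h
    rw [find_best_combo.eq_def]
    simp only [if_neg hr]
    split
    · rename_i heq
      rw [h] at heq
      simp at heq
    · rename_i ni tail heq
      rw [h] at heq
      injection heq with h1 h2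
      subst h1; subst h2
      show _ = (pvCompositions r (rest.length + 2)).foldl _ 0
      simp only [pvCompositions]
      rw [pv_foldl_flatMap]
      apply pv_foldl_congr_inv _ _ _ (fun b => 0 ≤ b)
        (fun b u _ hb => le_trans hb (le_max_left _ _)) _ 0 (le_refl 0)
      intro b u hu2 hb
      simp only [List.foldl_map, List.map_cons, pv_mix_cons]
      rw [pv_foldl_max_shift _ _ b (fun t _ => pv_score_nonneg _) hb]
      congr 1
      by_cases hru : r - u = 0
      · rw [find_best_combo.eq_def, if_pos hru, hru, pv_comps_zero rest.length]
        simp only [List.foldl_cons, List.foldl_nil]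
        rw [pv_mix_zeros _ _ _ (pv_add_length _ _ _), pv_calc_eq, max_eq_right (pv_score_nonneg _)]
      · have hnext : next ∈ (PySem.Dict.ofList dct).keys.filter (fun i => !visited.contains i) := by
          rw [h]; exact List.mem_cons_self
        have hlt : ((PySem.Dict.ofList dct).keys.filter (fun i => !(visited ++ [next]).contains i)).length < n := by
          rw [← hlen]
          exact pv_filter_visited_next _ _ _ _ hnd h
        have hu' : ∀ k ∈ (PySem.Dict.ofList dct).keys.filter (fun i => !(visited ++ [next]).contains i),
            5 ≤ ((PySem.Dict.ofList dct).getD k []).length := by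
          rw [hstep]
          intro k hk
          exact hu k (by rw [h]; exact List.mem_cons_of_mem _ hk)
        have hrec := ih _ hlt next (r - u)
          (pvAddIngredient ((PySem.Dict.ofList dct).getD cur []) props u) (visited ++ [next])
          rfl hru (by rw [pv_add_length]) (hu next hnext) hu'
        rw [hrec, hstep]
        simp only [List.length_cons, List.map_cons]

theorem pv_ofList_append (xs : List (String × List Int)) (p : String × List Int) :
    PySem.Dict.ofList (xs ++ [p]) = (PySem.Dict.ofList xs).insert p.1 p.2 := by
  show (xs ++ [p]).foldl (fun d q => d.insert q.1 q.2) PySem.Dict.empty = _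
  rw [List.foldl_append]
  rfl

theorem pv_mem_keys_ofList (l : List (String × List Int)) (k : String) :
    k ∈ (PySem.Dict.ofList l).keys ↔ k ∈ l.map Prod.fst := by
  induction l using List.reverseRecOn with
  | nil =>
    rw [show PySem.Dict.ofList ([] : List (String × List Int)) = PySem.Dict.empty from rfl]
    simp [PySem.Dict.keys_empty]
  | append_singleton xs p ih =>
    rw [pv_ofList_append, PySem.Dict.mem_keys_insert]
    simp [ih]
    tauto

theorem pv_ofList_getD (l : List (String × List Int)) (k : String)
    (h : k ∈ (PySem.Dict.ofList l).keys) :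
    ∃ v, (k, v) ∈ l ∧ (PySem.Dict.ofList l).getD k [] = v := by
  induction l using List.reverseRecOn with
  | nil =>
    rw [show PySem.Dict.ofList ([] : List (String × List Int)) = PySem.Dict.empty from rfl] at h
    simp [PySem.Dict.keys_empty] at h
  | append_singleton xs p ih =>
    rw [pv_ofList_append] at h ⊢
    by_cases hk : k = p.1
    · subst hk
      exact ⟨p.2, by simp, by rw [PySem.Dict.getD_insert_self]⟩
    · have h' : k ∈ (PySem.Dict.ofList xs).keys := by
        rw [PySem.Dict.mem_keys_insert] at h
        tauto
      obtain ⟨v, hv, hg⟩ := ih h'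
      exact ⟨v, by simp [hv], by rw [PySem.Dict.getD_insert, if_neg hk]; exact hg⟩

theorem pv_comps_neg (r : Int) (k : Nat) (h : r + 1 ≤ 0) : pvCompositions r (k + 2) = [] := by
  show (PySem.List.pyRange 0 (r + 1) 1).flatMap _ = []
  rw [PySem.List.pyRange_one_eq_nil h]
  rfl

-- ===== VERDICT (by name: the statement is the Claim_ definition above) =====
theorem find_best_combo_spec : Claim_equal_find_best_combo := by
  intro dct cur r props visited _hdom hpre
  unfold Spec_find_best_combo
  simp only [Pre_find_best_combo] at hpre
  obtain ⟨hcon, hrest⟩ := hpre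
  by_cases hr : r = 0
  · subst hr
    rw [find_best_combo.eq_def]
    simp [find_best_combo_alt, pv_calc_eq]
  · rw [if_neg hr] at hrest
    by_cases hneg : r < 0 ∧ dct.any (fun p => !visited.contains p.1) = true
    · obtain ⟨hrneg, hne⟩ := hneg
      obtain ⟨p, hpm, hb⟩ := List.any_eq_true.1 hne
      have hmem : p.1 ∈ (PySem.Dict.ofList dct).keys.filter (fun i => !visited.contains i) :=
        List.mem_filter.2 ⟨(pv_mem_keys_ofList _ _).2 (List.mem_map_of_mem hpm), hb⟩
      obtain ⟨next, rest, h⟩ := List.exists_cons_of_ne_nil (List.ne_nil_of_mem hmem)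
      have hrange : PySem.List.pyRange 0 (r + 1) 1 = [] := PySem.List.pyRange_one_eq_nil (by omega)
      rw [find_best_combo.eq_def]
      simp only [find_best_combo_alt, if_neg hr, h]
      split
      · rename_i heq
        rw [h] at heq
        simp at heq
      · rename_i ni tail heq
        rw [hrange]
        simp only [List.foldl_nil]
        show (0 : Int) = List.foldl _ 0 (pvCompositions r (rest.length + 2))
        rw [pv_comps_neg r rest.length (by omega)]
        rfl
    · rw [if_neg hneg] at hrest
      obtain ⟨hp5, hall⟩ := hrest
      have hck : cur ∈ (PySem.Dict.ofList dct).keys := by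
        obtain ⟨p, hpm, hpe⟩ := List.any_eq_true.1 hcon
        exact (pv_mem_keys_ofList _ _).2 (List.mem_map.2 ⟨p, hpm, eq_of_beq hpe⟩)
      have hc5 : 5 ≤ ((PySem.Dict.ofList dct).getD cur []).length := by
        obtain ⟨v, hv, hg⟩ := pv_ofList_getD dct cur hck
        rw [hg]
        rcases hall _ hv with ⟨_, hne⟩ | h5
        · exact absurd rfl hne
        · exact h5
      have hu5 : ∀ k ∈ (PySem.Dict.ofList dct).keys.filter (fun i => !visited.contains i),
          5 ≤ ((PySem.Dict.ofList dct).getD k []).length := by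
        intro k hk
        obtain ⟨hkk, hnv⟩ := List.mem_filter.1 hk
        obtain ⟨v, hv, hg⟩ := pv_ofList_getD dct k hkk
        rw [hg]
        rcases hall _ hv with ⟨hvc, _⟩ | h5
        · rw [hvc] at hnv
          simp at hnv
        · exact h5
      rw [pv_main dct _ cur r props visited rfl hr hp5 hc5 hu5]
      simp only [find_best_combo_alt, if_neg hr]
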